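-- pv_equiv track=rewrite | github.com/erichmond33/modifiedDibels | dibels_test/helpers.py | formatWordForHtml
-- ===== SOURCE A (Python) =====
-- def formatWordForHtml(sentenceSplitBySpacesWithoutSelectedWord, wordWithNonAlphanums, selectedWord, wordIndex):
--     # Lol, jank friggin code right here
--     appendedWord = False
--     for char in wordWithNonAlphanums:
--         if char.isalnum() == False:
--             sentenceSplitBySpacesWithoutSelectedWord.insert(wordIndex, char)
--             wordIndex += 1
--         elif appendedWord == False:
--             appendedWord = True
--             sentenceSplitBySpacesWithoutSelectedWord.insert(wordIndex, selectedWord)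
--             wordIndex += 1
--     return sentenceSplitBySpacesWithoutSelectedWord
-- ===== SOURCE B (Python) =====
-- def formatWordForHtml(sentenceSplitBySpacesWithoutSelectedWord, wordWithNonAlphanums, selectedWord, wordIndex):
--     punct = [c for c in wordWithNonAlphanums if not c.isalnum()]
--     if any(c.isalnum() for c in wordWithNonAlphanums):
--         offset = 0
--         while offset < len(wordWithNonAlphanums) and not wordWithNonAlphanums[offset].isalnum():
--             offset += 1
--         punct.insert(offset, selectedWord)
--     sentenceSplitBySpacesWithoutSelectedWord[wordIndex:wordIndex] = punct
--     return sentenceSplitBySpacesWithoutSelectedWord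
-- ===== Notes on version B (the rewrite author's own statement) =====
-- stated objective: simpler
-- what changed: A's flag-driven loop of one list.insert per character is replaced by a filter (collect non-alnum chars), a leading-punctuation count to place selectedWord, and one single slice-assignment splice into the sentence list; Pre_ excludes negative wordIndex when two or more items would be inserted, where A's repeated end-relative inserts land at accidental shifting positions.
-- outside the precondition, e.g. on formatWordForHtml(['a', 'b'], '.x', 'W', -1): A returns ['W', 'a', '.', 'b'], B returns ['a', '.', 'W', 'b']
import Mathlib
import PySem

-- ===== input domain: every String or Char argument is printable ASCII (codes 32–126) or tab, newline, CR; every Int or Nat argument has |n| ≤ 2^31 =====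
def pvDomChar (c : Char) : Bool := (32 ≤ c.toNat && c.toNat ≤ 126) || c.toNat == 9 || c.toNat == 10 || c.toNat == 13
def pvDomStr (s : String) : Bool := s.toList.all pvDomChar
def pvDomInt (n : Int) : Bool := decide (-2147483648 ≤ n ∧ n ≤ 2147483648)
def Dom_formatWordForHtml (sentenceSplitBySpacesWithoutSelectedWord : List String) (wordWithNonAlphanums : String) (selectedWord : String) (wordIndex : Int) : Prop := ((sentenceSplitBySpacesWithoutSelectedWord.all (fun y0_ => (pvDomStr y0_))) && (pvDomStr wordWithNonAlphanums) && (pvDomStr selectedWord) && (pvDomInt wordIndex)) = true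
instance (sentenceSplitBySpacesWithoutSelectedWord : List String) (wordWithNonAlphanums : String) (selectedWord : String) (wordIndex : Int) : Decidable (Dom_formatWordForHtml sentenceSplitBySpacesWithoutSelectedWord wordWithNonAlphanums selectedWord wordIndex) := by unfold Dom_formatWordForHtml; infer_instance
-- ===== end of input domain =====

-- B replaces A's flag-driven per-character insert loop by filter/locate + one single splice
-- (objective: simpler decomposition). Both mutate the list argument in place in Python; the
-- equivalence proved here is about the returned list (which is that same list object).

-- ===== PORT A =====
-- A's loop step: (list, wordIndex, appendedWord) updated per character, exactly as in Source A.
def pvStepA (selectedWord : String) (st : List String × Int × Bool) (c : Char) : List String × Int × Bool :=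
  if PySem.Chars.isalnum c = false then
    (PySem.List.insert st.1 st.2.1 c.toString, st.2.1 + 1, st.2.2)
  else if st.2.2 = false then
    (PySem.List.insert st.1 st.2.1 selectedWord, st.2.1 + 1, true)
  else st

def formatWordForHtml (sentenceSplitBySpacesWithoutSelectedWord : List String) (wordWithNonAlphanums : String) (selectedWord : String) (wordIndex : Int) : List String :=
  (wordWithNonAlphanums.toList.foldl (pvStepA selectedWord)
    (sentenceSplitBySpacesWithoutSelectedWord, wordIndex, false)).1

-- ===== PORT B =====
def formatWordForHtml_alt (sentenceSplitBySpacesWithoutSelectedWord : List String) (wordWithNonAlphanums : String) (selectedWord : String) (wordIndex : Int) : List String :=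
  let cs := wordWithNonAlphanums.toList
  let punct := (cs.filter (fun c => !PySem.Chars.isalnum c)).map (fun c => c.toString)
  let ins := if cs.any (fun c => PySem.Chars.isalnum c) then
      -- offset = number of leading non-alphanumeric characters (Source B's while loop)
      PySem.List.insert punct ((cs.takeWhile (fun c => !PySem.Chars.isalnum c)).length : Int) selectedWord
    else punct
  -- Source B's slice assignment lst[i:i] = ins; clampIdx is Python's slice-bound clamp (exact)
  let k := PySem.List.clampIdx sentenceSplitBySpacesWithoutSelectedWord.length wordIndex
  sentenceSplitBySpacesWithoutSelectedWord.take k ++ ins ++ sentenceSplitBySpacesWithoutSelectedWord.drop k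

-- ===== PRECONDITION & SPEC =====
-- Pre_ excludes negative wordIndex when two or more items would be inserted: there A's repeated
-- end-relative inserts land at shifting positions (an accident of inserting one element at a time),
-- a corner no caller of this helper exercises and where B's single-splice placement is as
-- defensible as A's; with at most one inserted item the two coincide and are claimed.
def Pre_formatWordForHtml (sentenceSplitBySpacesWithoutSelectedWord : List String) (wordWithNonAlphanums : String) (selectedWord : String) (wordIndex : Int) : Prop :=
  0 ≤ wordIndex ∨
    (wordWithNonAlphanums.toList.filter (fun c => !PySem.Chars.isalnum c)).length
      + (if wordWithNonAlphanums.toList.any (fun c => PySem.Chars.isalnum c) then 1 else 0) ≤ 1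
instance (sentenceSplitBySpacesWithoutSelectedWord : List String) (wordWithNonAlphanums : String) (selectedWord : String) (wordIndex : Int) : Decidable (Pre_formatWordForHtml sentenceSplitBySpacesWithoutSelectedWord wordWithNonAlphanums selectedWord wordIndex) := by unfold Pre_formatWordForHtml; infer_instance

def pvWitness_formatWordForHtml : List String × String × String × Int := (["the", "fox"], "jumps!", "jumps", 1)

def Spec_formatWordForHtml (sentenceSplitBySpacesWithoutSelectedWord : List String) (wordWithNonAlphanums : String) (selectedWord : String) (wordIndex : Int) (out : List String) : Prop := out = formatWordForHtml_alt sentenceSplitBySpacesWithoutSelectedWord wordWithNonAlphanums selectedWord wordIndex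
instance (sentenceSplitBySpacesWithoutSelectedWord : List String) (wordWithNonAlphanums : String) (selectedWord : String) (wordIndex : Int) (out : List String) : Decidable (Spec_formatWordForHtml sentenceSplitBySpacesWithoutSelectedWord wordWithNonAlphanums selectedWord wordIndex out) := by unfold Spec_formatWordForHtml; infer_instance

-- ===== CLAIM (what is proved, stated in full; the proofs are below) =====
def Claim_equal_formatWordForHtml : Prop := ∀ (sentenceSplitBySpacesWithoutSelectedWord : List String) (wordWithNonAlphanums : String) (selectedWord : String) (wordIndex : Int), Dom_formatWordForHtml sentenceSplitBySpacesWithoutSelectedWord wordWithNonAlphanums selectedWord wordIndex → Pre_formatWordForHtml sentenceSplitBySpacesWithoutSelectedWord wordWithNonAlphanums selectedWord wordIndex → Spec_formatWordForHtml sentenceSplitBySpacesWithoutSelectedWord wordWithNonAlphanums selectedWord wordIndex (formatWordForHtml sentenceSplitBySpacesWithoutSelectedWord wordWithNonAlphanums selectedWord wordIndex)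

-- ===== LEMMAS AND PROOFS =====

-- The sequence of items A inserts, in order, for a given flag state.
def pvInsSeq (selectedWord : String) (flag : Bool) : List Char → List String
  | [] => []
  | c :: cs =>
    if PySem.Chars.isalnum c = false then c.toString :: pvInsSeq selectedWord flag cs
    else if flag = false then selectedWord :: pvInsSeq selectedWord true cs
    else pvInsSeq selectedWord true cs

lemma pv_insert_nonneg {α : Type} (l : List α) (i : Int) (hi : 0 ≤ i) (v : α) :
    PySem.List.insert l i v = l.take i.toNat ++ v :: l.drop i.toNat := by
  simp only [PySem.List.insert, PySem.List.sliceIndices]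
  have h1 : ¬ ((1:Int) < 0) := by omega
  have h2 : ¬ (i < 0) := by omega
  simp only [if_neg h1, if_neg h2]
  by_cases h : i.toNat ≤ l.length
  · have : min i (l.length : Int) = i := by omega
    simp [this]
  · have : min i (l.length : Int) = (l.length : Int) := by omega
    simp [this, List.take_of_length_le (by omega : l.length ≤ i.toNat),
      List.drop_of_length_le (by omega : l.length ≤ i.toNat),
      List.take_of_length_le (le_refl l.length), List.drop_of_length_le (le_refl l.length)]

lemma pv_take_succ (l : List String) (n : Nat) (c : String) :
    (l.take n ++ c :: l.drop n).take (n + 1) = l.take n ++ [c] := by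
  rw [List.take_append]
  have h1 : (l.take n).take (n + 1) = l.take n := List.take_of_length_le (by rw [List.length_take]; omega)
  rw [h1]
  congr 1
  by_cases h : n ≤ l.length
  · have : (l.take n).length = n := by simp [h]
    simp [this]
  · have hd : l.drop n = [] := List.drop_of_length_le (by omega)
    have ht : (l.take n).length = l.length := by rw [List.length_take]; omega
    have h2 : n + 1 - (l.take n).length = (n - l.length) + 1 := by omega
    simp [hd, ht]
    omega

lemma pv_drop_succ (l : List String) (n : Nat) (c : String) :
    (l.take n ++ c :: l.drop n).drop (n + 1) = l.drop n := by
  rw [List.drop_append]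
  have h1 : (l.take n).drop (n + 1) = [] := List.drop_of_length_le (by rw [List.length_take]; omega)
  rw [h1]
  by_cases h : n ≤ l.length
  · have : (l.take n).length = n := by simp [h]
    simp [this]
  · have hd : l.drop n = [] := List.drop_of_length_le (by omega)
    have ht : (l.take n).length = l.length := by rw [List.length_take]; omega
    have h2 : n + 1 - (l.take n).length = (n - l.length) + 1 := by omega
    simp [hd, ht]
    omega

lemma pv_insert_succ_cons {α : Type} (x : α) (xs : List α) (n : Nat) (v : α) :
    PySem.List.insert (x :: xs) ((n : Int) + 1) v = x :: PySem.List.insert xs (n : Int) v := by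
  rw [pv_insert_nonneg _ _ (by omega), pv_insert_nonneg _ _ (by omega)]
  have h1 : ((n : Int) + 1).toNat = n + 1 := by omega
  have h2 : ((n : Int)).toNat = n := by omega
  simp [h1, h2]

-- Loop invariant for A's fold: starting from (l, i, flag) with 0 ≤ i, the final list is
-- l with the insertion sequence spliced at position i.
lemma pv_loopA (selectedWord : String) (cs : List Char) (l : List String) (i : Int)
    (hi : 0 ≤ i) (flag : Bool) :
    (cs.foldl (pvStepA selectedWord) (l, i, flag)).1
      = l.take i.toNat ++ pvInsSeq selectedWord flag cs ++ l.drop i.toNat := by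
  induction cs generalizing l i flag with
  | nil => simp [pvInsSeq]
  | cons c cs ih =>
    simp only [List.foldl_cons, pvStepA, pvInsSeq]
    have hsucc : (i + 1).toNat = i.toNat + 1 := by omega
    split_ifs with hc hf
    · rw [pv_insert_nonneg l i hi c.toString]
      simp only [ih _ _ (by omega : (0:Int) ≤ i + 1), hsucc, pv_take_succ, pv_drop_succ]
      simp
    · rw [pv_insert_nonneg l i hi selectedWord]
      simp only [ih _ _ (by omega : (0:Int) ≤ i + 1), hsucc, pv_take_succ, pv_drop_succ]
      simp
    · have hf' : flag = true := by revert hf; cases flag <;> simp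
      rw [hf', ih _ _ hi]

-- Once the word has been appended (flag = true) only the non-alphanumeric chars are inserted.
lemma pv_insSeq_true (selectedWord : String) (cs : List Char) :
    pvInsSeq selectedWord true cs
      = (cs.filter (fun c => !PySem.Chars.isalnum c)).map (fun c => c.toString) := by
  induction cs with
  | nil => simp [pvInsSeq]
  | cons c cs ih =>
    by_cases hc : PySem.Chars.isalnum c = false
    · simp [pvInsSeq, hc, ih]
    · have hc2 : PySem.Chars.isalnum c = true := by revert hc; cases PySem.Chars.isalnum c <;> simp
      simp [pvInsSeq, hc2, ih]

-- From the initial flag = false state, the inserted sequence is exactly B's ins list.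
lemma pv_insSeq_false (selectedWord : String) (cs : List Char) :
    pvInsSeq selectedWord false cs
      = (if cs.any (fun c => PySem.Chars.isalnum c) then
          PySem.List.insert
            ((cs.filter (fun c => !PySem.Chars.isalnum c)).map (fun c => c.toString))
            ((cs.takeWhile (fun c => !PySem.Chars.isalnum c)).length : Int) selectedWord
        else (cs.filter (fun c => !PySem.Chars.isalnum c)).map (fun c => c.toString)) := by
  induction cs with
  | nil => simp [pvInsSeq]
  | cons c cs ih =>
    by_cases hc : PySem.Chars.isalnum c = false
    · have hc' : (!PySem.Chars.isalnum c) = true := by simp [hc]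
      cases ha : cs.any (fun c => PySem.Chars.isalnum c) with
      | false => simp [pvInsSeq, hc, hc', ih, ha]
      | true =>
        simp only [pvInsSeq, hc, reduceIte, ih, List.any_cons, Bool.false_or, ha,
          List.filter_cons, hc', List.takeWhile_cons, List.length_cons,
          List.map_cons, Bool.not_false]
        push_cast
        rw [pv_insert_succ_cons]
    · have hc2 : PySem.Chars.isalnum c = true := by revert hc; cases PySem.Chars.isalnum c <;> simp
      have hc' : (!PySem.Chars.isalnum c) = false := by simp [hc2]
      simp only [pvInsSeq, hc2, reduceIte, List.any_cons, Bool.true_or,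
        List.filter_cons, hc', List.takeWhile_cons, pv_insSeq_true]
      rw [pv_insert_nonneg _ _ (by omega)]
      simp

lemma pv_insert_clamp {α : Type} (l : List α) (i : Int) (v : α) :
    PySem.List.insert l i v
      = l.take (PySem.List.clampIdx l.length i) ++ v :: l.drop (PySem.List.clampIdx l.length i) := by
  simp only [PySem.List.insert, PySem.List.sliceIndices, PySem.List.clampIdx]
  have h1 : ¬ ((1:Int) < 0) := by omega
  simp only [if_neg h1]
  by_cases h2 : i < 0
  · simp only [if_pos h2]
    by_cases h3 : (l.length : Int) + i < 0
    · have ha : max (i + (l.length : Int)) 0 = 0 := by omega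
      simp [h3, ha]
    · have ha : (max (i + (l.length : Int)) 0).toNat = ((l.length : Int) + i).toNat := by omega
      simp [h3, ha]
  · simp only [if_neg h2]
    by_cases h : i.toNat ≤ l.length
    · have ha : (min i (l.length : Int)).toNat = min i.toNat l.length := by omega
      simp [ha]
    · have ha : (min i (l.length : Int)).toNat = min i.toNat l.length := by omega
      simp [ha]

lemma pv_clampIdx_nonneg_take (l : List String) (i : Int) (hi : 0 ≤ i) :
    l.take (PySem.List.clampIdx l.length i) = l.take i.toNat := by
  simp only [PySem.List.clampIdx, if_neg (by omega : ¬ i < 0)]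
  by_cases h : i.toNat ≤ l.length
  · rw [min_eq_left h]
  · rw [min_eq_right (by omega), List.take_length,
      List.take_of_length_le (by omega : l.length ≤ i.toNat)]

lemma pv_clampIdx_nonneg_drop (l : List String) (i : Int) (hi : 0 ≤ i) :
    l.drop (PySem.List.clampIdx l.length i) = l.drop i.toNat := by
  simp only [PySem.List.clampIdx, if_neg (by omega : ¬ i < 0)]
  by_cases h : i.toNat ≤ l.length
  · rw [min_eq_left h]
  · rw [min_eq_right (by omega), List.drop_length,
      List.drop_of_length_le (by omega : l.length ≤ i.toNat)]

-- If nothing is to be inserted, A's loop leaves its whole state unchanged.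
lemma pv_loopA_nil (selectedWord : String) (cs : List Char)
    (st : List String × Int × Bool) (h : pvInsSeq selectedWord st.2.2 cs = []) :
    cs.foldl (pvStepA selectedWord) st = st := by
  induction cs generalizing st with
  | nil => simp
  | cons c cs ih =>
    by_cases hc : PySem.Chars.isalnum c = false
    · simp [pvInsSeq, hc] at h
    · have hc2 : PySem.Chars.isalnum c = true := by revert hc; cases PySem.Chars.isalnum c <;> simp
      by_cases hf : st.2.2 = false
      · simp [pvInsSeq, hc2, hf] at h
      · have hf' : st.2.2 = true := by revert hf; cases st.2.2 <;> simp
        simp only [pvInsSeq, hc2, hf', reduceIte] at h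
        simp only [List.foldl_cons, pvStepA, hc2, hf', reduceIte]
        exact ih st (by rw [hf']; exact h)

lemma pv_insSeq_false_nil (selectedWord : String) (cs : List Char)
    (h : pvInsSeq selectedWord false cs = []) : cs = [] := by
  cases cs with
  | nil => rfl
  | cons c cs =>
    by_cases hc : PySem.Chars.isalnum c = false
    · simp [pvInsSeq, hc] at h
    · have hc2 : PySem.Chars.isalnum c = true := by revert hc; cases PySem.Chars.isalnum c <;> simp
      simp [pvInsSeq, hc2] at h

-- If exactly one item is to be inserted, A's loop performs exactly one insert at its index.
lemma pv_loopA_single (selectedWord : String) (cs : List Char) (l : List String) (i : Int)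
    (x : String) (h : pvInsSeq selectedWord false cs = [x]) :
    (cs.foldl (pvStepA selectedWord) (l, i, false)).1 = PySem.List.insert l i x := by
  cases cs with
  | nil => simp [pvInsSeq] at h
  | cons c cs =>
    by_cases hc : PySem.Chars.isalnum c = false
    · simp only [pvInsSeq, hc, reduceIte] at h
      injection h with hx hrest
      have hcs : cs = [] := pv_insSeq_false_nil selectedWord cs hrest
      subst hcs
      simp only [List.foldl_cons, List.foldl_nil, pvStepA, hc, reduceIte]
      rw [hx]
    · have hc2 : PySem.Chars.isalnum c = true := by revert hc; cases PySem.Chars.isalnum c <;> simp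
      simp only [pvInsSeq, hc2, reduceIte] at h
      injection h with hx hrest
      simp only [List.foldl_cons, pvStepA, hc2, reduceIte]
      rw [pv_loopA_nil selectedWord cs _ hrest, hx]
      simp

-- ===== VERDICT (by name: the statement is the Claim_ definition above) =====
theorem formatWordForHtml_spec : Claim_equal_formatWordForHtml := by
  intro l w sel i _ hpre
  unfold Spec_formatWordForHtml formatWordForHtml formatWordForHtml_alt
  dsimp only
  rw [← pv_insSeq_false sel w.toList]
  rcases hpre with hpos | hsmall
  · rw [pv_loopA sel w.toList l i hpos false]
    simp only [pv_clampIdx_nonneg_take l i hpos, pv_clampIdx_nonneg_drop l i hpos]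
  · -- at most one inserted item: A performs at most one (clamped) insert, B one single splice
    have hlen : (pvInsSeq sel false w.toList).length
        = (w.toList.filter (fun c => !PySem.Chars.isalnum c)).length
          + (if w.toList.any (fun c => PySem.Chars.isalnum c) then 1 else 0) := by
      rw [pv_insSeq_false]
      by_cases ha : w.toList.any (fun c => PySem.Chars.isalnum c)
      · simp only [ha, if_true, reduceIte, PySem.List.length_insert, List.length_map]
      · simp [ha]
    cases hseq : pvInsSeq sel false w.toList with
    | nil =>
      have hcs : w.toList = [] := pv_insSeq_false_nil sel w.toList hseq
      simp [hcs, pvInsSeq]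
    | cons x rest =>
      cases rest with
      | nil =>
        rw [pv_loopA_single sel w.toList l i x hseq, pv_insert_clamp]
        simp
      | cons y t =>
        exfalso
        rw [hseq] at hlen
        simp only [List.length_cons] at hlen
        omega
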